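-- pv_equiv track=rewrite | github.com/JakubMikolajczyk/Studia | Sztuczna inteligencja/Lista 2/1.py | opt_dist
-- ===== SOURCE A (Python) =====
-- def opt_dist(data, n):
--     tab = [0]
--     sum = 0
--     for i in range(0, len(data)):
--         if data[i]:
--             sum += 1
--         tab.append(sum)
--
--     max = -1
--     for i in range(n, len(data) + 1):
--         if tab[i] - tab[i - n] > max:
--             max = tab[i] - tab[i - n]
--
--     return n - max + (sum - max)
-- ===== SOURCE B (Python) =====
-- def opt_dist(data, n):
--     total = 0
--     for x in data:
--         if x:
--             total += 1
--     best = 0 if n == 0 else -1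
--     cnt = 0
--     for i in range(len(data)):
--         if data[i]:
--             cnt += 1
--         if i >= n and data[i - n]:
--             cnt -= 1
--         if i >= n - 1 and cnt > best:
--             best = cnt
--     return n - best + (total - best)
-- ===== Notes on version B (the rewrite author's own statement) =====
-- stated objective: simpler
-- what changed: B replaces A's prefix-sum table (built by appending in a first pass, then scanned by index pairs) with a single rolling-window pass that maintains the current window's count of truthy elements and the best window seen, plus a plain count of all truthy elements.
import Mathlib
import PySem

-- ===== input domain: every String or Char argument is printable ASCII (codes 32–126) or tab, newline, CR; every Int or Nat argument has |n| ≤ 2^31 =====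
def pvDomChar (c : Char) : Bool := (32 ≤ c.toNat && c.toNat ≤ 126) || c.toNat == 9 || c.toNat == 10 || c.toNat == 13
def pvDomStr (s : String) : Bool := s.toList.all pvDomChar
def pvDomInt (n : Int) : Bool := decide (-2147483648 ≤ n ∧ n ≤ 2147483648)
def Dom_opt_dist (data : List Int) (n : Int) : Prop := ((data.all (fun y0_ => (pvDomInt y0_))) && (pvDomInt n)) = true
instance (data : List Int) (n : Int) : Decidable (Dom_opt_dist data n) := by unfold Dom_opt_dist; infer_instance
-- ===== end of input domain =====

-- B replaces A's prefix-sum table with a single rolling-window pass (same O(n) time, O(1) extra space; objective: simpler).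


-- ===== PORT A =====
def opt_dist (data : List Int) (n : Int) : Int :=
  -- tab = [0]; sum = 0; for i in range(0, len(data)): if data[i]: sum += 1; tab.append(sum)
  let st := (PySem.List.pyRange 0 (PySem.List.len data) 1).foldl
      (fun (p : List Int × Int) i =>
        let s := if PySem.List.pyGetD data i 0 ≠ 0 then p.2 + 1 else p.2
        (p.1 ++ [s], s)) ([0], 0)
  let tab := st.1
  let s := st.2
  -- max = -1; for i in range(n, len(data) + 1): if tab[i] - tab[i - n] > max: max = tab[i] - tab[i - n]
  let m := (PySem.List.pyRange n (PySem.List.len data + 1) 1).foldl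
      (fun m i =>
        if PySem.List.pyGetD tab i 0 - PySem.List.pyGetD tab (i - n) 0 > m then
          PySem.List.pyGetD tab i 0 - PySem.List.pyGetD tab (i - n) 0
        else m) (-1)
  n - m + (s - m)

-- ===== PORT B =====
def opt_dist_alt (data : List Int) (n : Int) : Int :=
  let total := data.foldl (fun a x => if x ≠ 0 then a + 1 else a) (0 : Int)
  let init : Int := if n = 0 then 0 else -1
  let st := (PySem.List.pyRange 0 (PySem.List.len data) 1).foldl
      (fun (p : Int × Int) i =>
        let c1 := if PySem.List.pyGetD data i 0 ≠ 0 then p.1 + 1 else p.1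
        let c2 := if i ≥ n ∧ PySem.List.pyGetD data (i - n) 0 ≠ 0 then c1 - 1 else c1
        let b := if i ≥ n - 1 ∧ c2 > p.2 then c2 else p.2
        (c2, b)) (0, init)
  n - st.2 + (total - st.2)

-- ===== PRECONDITION & SPEC =====
-- Pre_ excludes exactly n < 0, where A always raises IndexError (tab[i - n] runs past the table).
def Pre_opt_dist (data : List Int) (n : Int) : Prop := 0 ≤ n
instance (data : List Int) (n : Int) : Decidable (Pre_opt_dist data n) := by unfold Pre_opt_dist; infer_instance
def pvWitness_opt_dist : List Int × Int := ([1, 0, 2, 0, 1], 2)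

def Spec_opt_dist (data : List Int) (n : Int) (out : Int) : Prop := out = opt_dist_alt data n
instance (data : List Int) (n : Int) (out : Int) : Decidable (Spec_opt_dist data n out) := by unfold Spec_opt_dist; infer_instance

-- ===== CLAIM (what is proved, stated in full; the proofs are below) =====
def Claim_equal_opt_dist : Prop := ∀ (data : List Int) (n : Int), Dom_opt_dist data n → Pre_opt_dist data n → Spec_opt_dist data n (opt_dist data n)

-- ===== LEMMAS AND PROOFS =====

-- number of truthy elements of a list, as an Int
def cntP (l : List Int) : Int := (l.countP (fun x => decide (x ≠ 0)) : Int)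
-- number of truthy elements among the first k (the prefix sums A tabulates)
def Pfn (data : List Int) (k : Nat) : Int := cntP (data.take k)
-- the window value A compares at window end i, and the max-accumulating step
def FA (data : List Int) (n : Int) (i : Int) : Int := Pfn data i.toNat - Pfn data (i - n).toNat
def gmax (data : List Int) (n : Int) (m i : Int) : Int := if FA data n i > m then FA data n i else m
-- B's loop state after k steps: current window count and best so far
def Cval (data : List Int) (n : Int) (k : Nat) : Int := Pfn data k - Pfn data (k - n.toNat)
def Bval (data : List Int) (n : Int) (k : Nat) : Int :=
  (PySem.List.pyRange (max n 1) ((k : Int) + 1) 1).foldl (gmax data n) (if n = 0 then 0 else -1)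
-- A's running-sum scan
def scanC : List Int → Int → List Int
  | [], _ => []
  | x :: l, s => let s' := if x ≠ 0 then s + 1 else s; s' :: scanC l s'

lemma cntP_nil : cntP [] = 0 := by simp [cntP]

lemma cntP_cons (x : Int) (l : List Int) :
    cntP (x :: l) = (if x ≠ 0 then 1 else 0) + cntP l := by
  by_cases h : x = 0 <;> simp [cntP, List.countP_cons, h] <;> push_cast <;> ring

lemma Pfn_zero (data : List Int) : Pfn data 0 = 0 := by simp [Pfn, cntP]

lemma cntP_append (a b : List Int) : cntP (a ++ b) = cntP a + cntP b := by
  simp [cntP, List.countP_append]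

lemma cntP_singleton (y : Int) : cntP [y] = if y ≠ 0 then 1 else 0 := by
  by_cases h : y = 0 <;> simp [cntP, h]

lemma Pfn_succ (data : List Int) (k : Nat) (h : k < data.length) :
    Pfn data (k + 1) = Pfn data k + (if data.getD k 0 ≠ 0 then 1 else 0) := by
  unfold Pfn
  rw [List.take_succ, List.getElem?_eq_getElem h]
  simp only [Option.toList_some]
  rw [cntP_append, cntP_singleton, List.getD_eq_getElem data 0 h]

lemma scanC_length (l : List Int) (s : Int) : (scanC l s).length = l.length := by
  induction l generalizing s with
  | nil => simp [scanC]
  | cons x l ih => simp [scanC, ih]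

lemma foldA_eq (l : List Int) (t : List Int) (s : Int) :
    l.foldl (fun (p : List Int × Int) x =>
        (p.1 ++ [if x ≠ 0 then p.2 + 1 else p.2], if x ≠ 0 then p.2 + 1 else p.2)) (t, s)
      = (t ++ scanC l s, s + cntP l) := by
  induction l generalizing t s with
  | nil => simp [scanC, cntP]
  | cons x l ih =>
      simp only [List.foldl_cons]
      rw [ih]
      by_cases h : x = 0 <;> simp [scanC, cntP_cons, h] <;> ring

lemma scanC_get (l : List Int) (s : Int) (k : Nat) (hk : k < l.length) :
    (scanC l s)[k]? = some (s + cntP (l.take (k + 1))) := by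
  induction l generalizing s k with
  | nil => simp at hk
  | cons x l ih =>
      cases k with
      | zero => by_cases h : x = 0 <;> simp [scanC, cntP_cons, cntP_nil, h] <;> ring
      | succ k =>
          simp only [scanC, List.getElem?_cons_succ]
          rw [ih (if x ≠ 0 then s + 1 else s) k (by simpa using hk)]
          by_cases h : x = 0 <;> simp [List.take_succ_cons, cntP_cons, h] <;> ring

lemma tab_get (data : List Int) (j : Nat) (h : j ≤ data.length) :
    ((0 : Int) :: scanC data 0)[j]? = some (Pfn data j) := by
  cases j with
  | zero => simp [Pfn, cntP]
  | succ j =>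
      simp only [List.getElem?_cons_succ]
      rw [scanC_get data 0 j (by omega)]
      simp [Pfn]

lemma tabD (data : List Int) (i : Int) (h0 : 0 ≤ i) (h1 : i ≤ (data.length : Int)) :
    PySem.List.pyGetD ((0 : Int) :: scanC data 0) i 0 = Pfn data i.toNat := by
  have hlen : ((0 : Int) :: scanC data 0).length = data.length + 1 := by simp [scanC_length]
  rw [PySem.List.pyGetD_eq_getElem _ 0 h0 (by rw [hlen]; push_cast; omega)]
  have h2 := tab_get data i.toNat (by omega)
  rw [List.getElem?_eq_getElem (by rw [hlen]; omega)] at h2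
  exact Option.some.inj h2

lemma htotal (data : List Int) :
    data.foldl (fun a x => if x ≠ 0 then a + 1 else a) (0 : Int) = cntP data := by
  rw [PySem.List.foldl_congr_mem data _
      (fun a x => if (fun y : Int => decide (y ≠ 0)) x = true then a + 1 else a) 0
      (by intro acc x _; simp)]
  rw [PySem.List.foldl_count_if]
  simp [cntP]

lemma Bval_eq_A_max (data : List Int) (n : Int) (hn : 0 ≤ n) :
    (PySem.List.pyRange n ((data.length : Int) + 1) 1).foldl (gmax data n) (-1) =
      Bval data n data.length := by
  by_cases h0 : n = 0
  · subst h0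
    rw [PySem.List.pyRange_one_cons (by omega)]
    simp only [List.foldl_cons]
    have hg : gmax data 0 (-1) 0 = 0 := by norm_num [gmax, FA, Pfn, cntP]
    rw [hg]
    unfold Bval
    norm_num
  · unfold Bval
    rw [max_eq_left (by omega), if_neg h0]

lemma A_max_congr (data : List Int) (n : Int) (hn : 0 ≤ n) :
    (PySem.List.pyRange n ((data.length : Int) + 1) 1).foldl
      (fun m i =>
        if PySem.List.pyGetD ((0 : Int) :: scanC data 0) i 0 -
              PySem.List.pyGetD ((0 : Int) :: scanC data 0) (i - n) 0 > m then
          PySem.List.pyGetD ((0 : Int) :: scanC data 0) i 0 -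
            PySem.List.pyGetD ((0 : Int) :: scanC data 0) (i - n) 0
        else m) (-1)
    = Bval data n data.length := by
  refine Eq.trans (PySem.List.foldl_congr_mem _ _ (gmax data n) (-1) ?_) (Bval_eq_A_max data n hn)
  intro m i hi
  rw [PySem.List.mem_pyRange_one] at hi
  rw [tabD data i (by omega) (by omega), tabD data (i - n) (by omega) (by omega)]
  simp only [gmax, FA]

lemma Bval_succ (data : List Int) (n : Int) (k : Nat) (h : max n 1 ≤ (k : Int) + 1) :
    Bval data n (k + 1) = gmax data n (Bval data n k) ((k : Int) + 1) := by
  unfold Bval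
  rw [show (((k + 1 : Nat) : Int)) + 1 = ((k : Int) + 1) + 1 from by push_cast; ring]
  rw [PySem.List.pyRange_one_succ_right h, List.foldl_append]
  simp only [List.foldl_cons, List.foldl_nil]

lemma Bval_succ_skip (data : List Int) (n : Int) (k : Nat) (h : (k : Int) + 1 < n) :
    Bval data n (k + 1) = Bval data n k := by
  unfold Bval
  rw [PySem.List.pyRange_one_eq_nil (le_trans (by push_cast; omega) (le_max_left n 1)),
      PySem.List.pyRange_one_eq_nil (le_trans (by push_cast; omega) (le_max_left n 1))]

lemma B_inv (data : List Int) (n : Int) (hn : 0 ≤ n) :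
    ∀ (k : Nat), k ≤ data.length →
    (PySem.List.pyRange 0 ((k : Nat) : Int) 1).foldl
      (fun (p : Int × Int) i =>
        (if i ≥ n ∧ PySem.List.pyGetD data (i - n) 0 ≠ 0 then
            (if PySem.List.pyGetD data i 0 ≠ 0 then p.1 + 1 else p.1) - 1
          else (if PySem.List.pyGetD data i 0 ≠ 0 then p.1 + 1 else p.1),
         if i ≥ n - 1 ∧
              (if i ≥ n ∧ PySem.List.pyGetD data (i - n) 0 ≠ 0 then
                  (if PySem.List.pyGetD data i 0 ≠ 0 then p.1 + 1 else p.1) - 1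
                else (if PySem.List.pyGetD data i 0 ≠ 0 then p.1 + 1 else p.1)) > p.2 then
            (if i ≥ n ∧ PySem.List.pyGetD data (i - n) 0 ≠ 0 then
                (if PySem.List.pyGetD data i 0 ≠ 0 then p.1 + 1 else p.1) - 1
              else (if PySem.List.pyGetD data i 0 ≠ 0 then p.1 + 1 else p.1))
          else p.2))
      ((0 : Int), if n = 0 then (0 : Int) else -1)
    = (Cval data n k, Bval data n k) := by
  intro k
  induction k with
  | zero =>
      intro _
      unfold Cval Bval
      simp only [Nat.cast_zero, zero_add, Nat.zero_sub]
      rw [PySem.List.pyRange_one_eq_nil (le_refl 0),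
          PySem.List.pyRange_one_eq_nil (le_max_right n 1)]
      simp [Pfn, cntP]
  | succ k ih =>
      intro hk
      have hkl : k < data.length := by omega
      have ih' := ih (by omega)
      rw [show (((k + 1 : Nat)) : Int) = (k : Int) + 1 from by push_cast; ring]
      rw [PySem.List.pyRange_one_succ_right (by omega), List.foldl_append, ih']
      simp only [List.foldl_cons, List.foldl_nil]
      have hFA : FA data n ((k : Int) + 1) = Cval data n (k + 1) := by
        unfold FA Cval
        rw [show (((k : Int)) + 1).toNat = k + 1 from by omega,
            show ((((k : Int)) + 1) - n).toNat = k + 1 - n.toNat from by omega]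
      have hC : (if (k : Int) ≥ n ∧ PySem.List.pyGetD data ((k : Int) - n) 0 ≠ 0 then
            (if PySem.List.pyGetD data ((k : Int)) 0 ≠ 0 then Cval data n k + 1 else Cval data n k) - 1
          else (if PySem.List.pyGetD data ((k : Int)) 0 ≠ 0 then Cval data n k + 1 else Cval data n k))
          = Cval data n (k + 1) := by
        by_cases hge : n ≤ (k : Int)
        · have hsub : (k : Int) - n = ((k - n.toNat : Nat) : Int) := by omega
          rw [hsub]
          simp only [PySem.List.pyGetD_natCast]
          unfold Cval
          rw [Pfn_succ data k hkl, show k + 1 - n.toNat = (k - n.toNat) + 1 from by omega,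
              Pfn_succ data (k - n.toNat) (by omega)]
          simp only [ge_iff_le, hge, true_and]
          split_ifs <;> ring
        · rw [if_neg (fun h => hge h.1)]
          simp only [PySem.List.pyGetD_natCast]
          unfold Cval
          rw [Pfn_succ data k hkl, show k - n.toNat = 0 from by omega,
              show k + 1 - n.toNat = 0 from by omega, Pfn_zero]
          split_ifs <;> ring
      rw [hC, Prod.mk.injEq]
      refine ⟨rfl, ?_⟩
      by_cases hc : (k : Int) ≥ n - 1
      · rw [Bval_succ data n k (max_le (by omega) (by omega))]
        unfold gmax
        rw [hFA]
        simp [hc]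
      · rw [if_neg (fun h => hc h.1), Bval_succ_skip data n k (by omega)]

-- ===== VERDICT (by name: the statement is the Claim_ definition above) =====
theorem opt_dist_spec : Claim_equal_opt_dist := by
  intro data n hdom hpre
  have hn : 0 ≤ n := hpre
  unfold Spec_opt_dist
  simp only [opt_dist, opt_dist_alt, PySem.List.len_eq]
  have h1 : (PySem.List.pyRange 0 ((data.length : Int)) 1).foldl
      (fun (p : List Int × Int) i =>
        (p.1 ++ [if PySem.List.pyGetD data i 0 ≠ 0 then p.2 + 1 else p.2],
         if PySem.List.pyGetD data i 0 ≠ 0 then p.2 + 1 else p.2)) ([0], 0)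
      = ((0 : Int) :: scanC data 0, cntP data) := by
    exact (PySem.List.foldl_pyRange_zero_pyGetD' data 0
      (fun (p : List Int × Int) x =>
        (p.1 ++ [if x ≠ 0 then p.2 + 1 else p.2], if x ≠ 0 then p.2 + 1 else p.2))
      ([0], 0)).trans (by rw [foldA_eq]; simp)
  rw [h1]
  dsimp only
  rw [A_max_congr data n hn, htotal data, B_inv data n hn data.length (le_refl _)]
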